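-- pv_equiv track=rewrite | github.com/joaopalet/LEIC-IST | 1st_Year/FP/1st_Project/proj1-86447.py | obtem_codigo2
-- ===== SOURCE A (Python) =====
-- def obtem_codigo2(car, chave):
--     #Funcao que recebe dois argumentos, car, consistindo num caractere, e chave, consistindo numa chave e devolve uma cadeia de 2 caracteres, correspondendo ao codigo do caractere de acordo com chave. Se o caractere nao pertencer a chave, a funcao deve devolver 'XX'.
--     pertence = False
--     for i1 in range(len(chave)):
--         for i2 in range(len(chave[i1])):
--             if chave[i1][i2] == car:
--                 pertence = True
--                 res = str(i1) + str(i2)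
--     if pertence == False:
--         res = 'XX'
--     return res
-- ===== SOURCE B (Python) =====
-- def obtem_codigo2(car, chave):
--     for i1 in reversed(range(len(chave))):
--         linha = chave[i1]
--         for i2 in reversed(range(len(linha))):
--             if linha[i2] == car:
--                 return str(i1) + str(i2)
--     return 'XX'
-- ===== Notes on version B (the rewrite author's own statement) =====
-- stated objective: simpler
-- what changed: Replaces the forward full scan that keeps overwriting a flag and a last-match result with a reverse scan that returns the first (i.e. last forward) match immediately.
import Mathlib
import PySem

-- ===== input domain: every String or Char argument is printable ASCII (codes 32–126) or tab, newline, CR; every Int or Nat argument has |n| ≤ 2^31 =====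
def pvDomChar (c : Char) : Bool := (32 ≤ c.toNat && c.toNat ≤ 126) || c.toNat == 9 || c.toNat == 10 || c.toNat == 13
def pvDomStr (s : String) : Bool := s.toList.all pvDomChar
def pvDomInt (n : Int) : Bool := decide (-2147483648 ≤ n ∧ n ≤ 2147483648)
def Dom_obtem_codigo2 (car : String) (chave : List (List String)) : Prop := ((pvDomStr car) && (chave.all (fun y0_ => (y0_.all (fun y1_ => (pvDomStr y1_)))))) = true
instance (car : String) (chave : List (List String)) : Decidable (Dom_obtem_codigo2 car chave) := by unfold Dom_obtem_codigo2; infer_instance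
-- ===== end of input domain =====

-- B replaces A's forward full scan with flag + last-match overwrite by a reverse scan
-- that returns at the first match (simpler decomposition, same result).


-- ===== PORT A =====
-- state: 'none' = pertence is False (res unset); 'some s' = pertence is True, res = s
def obtem_codigo2 (car : String) (chave : List (List String)) : String :=
  let st :=
    (List.range chave.length).foldl (fun acc i1 =>
      (List.range (chave.getD i1 []).length).foldl (fun acc i2 =>
        if (chave.getD i1 []).getD i2 "" == car then
          some (PySem.Int.toStr (i1 : Int) ++ PySem.Int.toStr (i2 : Int))
        else acc) acc) none
  match st with
  | some res => res
  | none => "XX"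

-- ===== PORT B =====
-- inner loop: for i2 in reversed(range(len(linha))): return on first match
def pvScanRow (car : String) (i1 : Nat) (linha : List String) : List Nat → Option String
  | [] => none
  | i2 :: rest =>
    if linha.getD i2 "" == car then
      some (PySem.Int.toStr (i1 : Int) ++ PySem.Int.toStr (i2 : Int))
    else pvScanRow car i1 linha rest

-- outer loop: for i1 in reversed(range(len(chave)))
def pvScanKey (car : String) (chave : List (List String)) : List Nat → Option String
  | [] => none
  | i1 :: rest =>
    match pvScanRow car i1 (chave.getD i1 []) (List.range (chave.getD i1 []).length).reverse with
    | some s => some s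
    | none => pvScanKey car chave rest

def obtem_codigo2_alt (car : String) (chave : List (List String)) : String :=
  match pvScanKey car chave (List.range chave.length).reverse with
  | some s => s
  | none => "XX"

-- ===== PRECONDITION & SPEC =====
def Spec_obtem_codigo2 (car : String) (chave : List (List String)) (out : String) : Prop := out = obtem_codigo2_alt car chave
instance (car : String) (chave : List (List String)) (out : String) : Decidable (Spec_obtem_codigo2 car chave out) := by unfold Spec_obtem_codigo2; infer_instance

-- ===== CLAIM (what is proved, stated in full; the proofs are below) =====
def Claim_equal_obtem_codigo2 : Prop := ∀ (car : String) (chave : List (List String)), Dom_obtem_codigo2 car chave → Spec_obtem_codigo2 car chave (obtem_codigo2 car chave)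

-- ===== LEMMAS AND PROOFS =====

-- "last match wins" fold = first match of the reversed list
theorem pv_foldl_lastmatch {α β : Type} (p : α → Bool) (f : α → β) :
    ∀ (l : List α) (init : Option β),
      l.foldl (fun acc x => if p x then some (f x) else acc) init
        = ((l.reverse.find? p).map f).or init := by
  intro l
  induction l with
  | nil => intro init; simp
  | cons x xs ih =>
    intro init
    simp only [List.foldl_cons, List.reverse_cons, List.find?_append, ih]
    cases h : xs.reverse.find? p with
    | some y => simp [Option.or]
    | none =>
      by_cases hp : p x <;> simp [hp, Option.or]

theorem pvScanRow_eq (car : String) (i1 : Nat) (linha : List String) :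
    ∀ idxs : List Nat,
      pvScanRow car i1 linha idxs
        = (idxs.find? (fun i2 => linha.getD i2 "" == car)).map
            (fun i2 : Nat => PySem.Int.toStr (i1 : Int) ++ PySem.Int.toStr (i2 : Int)) := by
  intro idxs
  induction idxs with
  | nil => simp [pvScanRow]
  | cons i2 rest ih =>
    rw [pvScanRow]
    cases hp : (linha.getD i2 "" == car) with
    | true => simp only [List.find?_cons, hp, Option.map_some, if_true]
    | false => rw [if_neg (by simp)]; simp only [List.find?_cons, hp, ih]

theorem pvScanKey_eq (car : String) (chave : List (List String)) :
    ∀ idxs : List Nat,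
      pvScanKey car chave idxs
        = ((idxs.flatMap (fun i1 =>
              (List.range (chave.getD i1 []).length).reverse.map (fun i2 => (i1, i2)))).find?
              (fun q => (chave.getD q.1 []).getD q.2 "" == car)).map
            (fun q => PySem.Int.toStr (q.1 : Int) ++ PySem.Int.toStr (q.2 : Int)) := by
  intro idxs
  induction idxs with
  | nil => simp [pvScanKey]
  | cons i1 rest ih =>
    rw [pvScanKey, pvScanRow_eq, ih, List.flatMap_cons, List.find?_append, List.find?_map]
    have hc : ((fun q : Nat × Nat => (chave.getD q.1 []).getD q.2 "" == car) ∘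
        fun i2 => (i1, i2)) = (fun i2 => (chave.getD i1 []).getD i2 "" == car) := rfl
    rw [hc]
    cases h : (List.range (chave.getD i1 []).length).reverse.find?
        (fun i2 => (chave.getD i1 []).getD i2 "" == car) with
    | some y => rfl
    | none => rfl

-- A's nested folds = single fold over the flattened (i1,i2) pair list
theorem pv_nested_foldl (car : String) (chave : List (List String)) (init : Option String) :
    (List.range chave.length).foldl (fun acc i1 =>
        (List.range (chave.getD i1 []).length).foldl (fun acc i2 =>
          if (chave.getD i1 []).getD i2 "" == car then
            some (PySem.Int.toStr (i1 : Int) ++ PySem.Int.toStr (i2 : Int))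
          else acc) acc) init
      = ((List.range chave.length).flatMap (fun i1 =>
            (List.range (chave.getD i1 []).length).map (fun i2 => (i1, i2)))).foldl
          (fun acc q =>
            if (chave.getD q.1 []).getD q.2 "" == car then
              some (PySem.Int.toStr (q.1 : Int) ++ PySem.Int.toStr (q.2 : Int))
            else acc) init := by
  induction (List.range chave.length) generalizing init with
  | nil => simp
  | cons i1 rest ih =>
    simp only [List.foldl_cons, List.flatMap_cons, List.foldl_append, List.foldl_map, ih]

-- ===== VERDICT (by name: the statement is the Claim_ definition above) =====
theorem obtem_codigo2_spec : Claim_equal_obtem_codigo2 := by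
  intro car chave _
  show obtem_codigo2 car chave = obtem_codigo2_alt car chave
  unfold obtem_codigo2 obtem_codigo2_alt
  rw [pv_nested_foldl, pv_foldl_lastmatch, pvScanKey_eq, List.reverse_flatMap]
  simp [List.map_reverse, Option.or_none]
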